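-- pv_equiv track=rewrite | github.com/salaval/adventofcode2023 | 4b.py | no_matches
-- ===== SOURCE A (Python) =====
-- def no_matches(scratchcard):
--     winning_numbers = set()
--     matches = 0
--     right_part = False
--     for token in scratchcard.split():
--         if token == "|":
--             right_part = True
--         if right_part:
--             if token in winning_numbers:
--                 matches += 1
--         elif token.isdigit():
--             winning_numbers.add(token)
--     return(matches)
-- ===== SOURCE B (Python) =====
-- def no_matches(scratchcard):
--     tokens = scratchcard.split()
--     try:
--         idx = tokens.index("|")
--     except ValueError:
--         return 0
--     freq = {}
--     for t in tokens[idx + 1:]: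
--         freq[t] = freq.get(t, 0) + 1
--     total = 0
--     for t in dict.fromkeys(t for t in tokens[:idx] if t.isdigit()):
--         total += freq.get(t, 0)
--     return total
-- ===== Notes on version B (the rewrite author's own statement) =====
-- stated objective: alternative
-- what changed: Instead of A's membership-test-per-right-token against a set built during one flag-gated pass, B builds a frequency dictionary of the tokens after '|' and sums those frequencies over the distinct digit tokens before '|' (exchanging the roles of the two sides: lookups are by left-side key into a right-side counter).
import Mathlib
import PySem

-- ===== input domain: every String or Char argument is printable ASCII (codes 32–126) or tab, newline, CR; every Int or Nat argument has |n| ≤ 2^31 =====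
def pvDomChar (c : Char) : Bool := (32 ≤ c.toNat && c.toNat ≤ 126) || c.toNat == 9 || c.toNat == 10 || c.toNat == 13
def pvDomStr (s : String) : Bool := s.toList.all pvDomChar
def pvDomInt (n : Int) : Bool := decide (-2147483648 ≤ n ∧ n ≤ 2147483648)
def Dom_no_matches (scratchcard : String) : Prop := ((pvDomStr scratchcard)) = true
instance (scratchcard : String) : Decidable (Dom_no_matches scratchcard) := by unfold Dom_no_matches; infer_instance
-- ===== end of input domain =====

-- B replaces A's flag-gated single pass (set of left tokens, membership test per right token) by
-- a frequency dictionary of the right-side tokens summed over the distinct left digit tokens.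

-- ===== PORT A =====
-- one loop step of A's for-loop over the state (winning_numbers, matches, right_part)
def pvStepA (st : PySem.Set String × Int × Bool) (token : String) : PySem.Set String × Int × Bool :=
  let w := st.1
  let m := st.2.1
  let r := if token = "|" then true else st.2.2
  if r then (w, (if PySem.Set.contains w token then m + 1 else m), r)
  else if PySem.Str.strIsdigit token then (PySem.Set.add w token, m, r)
  else (w, m, r)

def no_matches (scratchcard : String) : Int :=
  ((PySem.Str.split₀ scratchcard).foldl pvStepA (PySem.Set.empty, 0, false)).2.1

-- ===== PORT B =====
def no_matches_alt (scratchcard : String) : Int :=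
  let tokens := PySem.Str.split₀ scratchcard
  match PySem.List.index? tokens "|" with
  | none => 0
  | some idx =>
    -- freq[t] = freq.get(t, 0) + 1 over tokens[idx+1:]
    let freq := (tokens.drop (idx + 1)).foldl
      (fun d t => d.insert t (d.getD t 0 + 1)) PySem.Dict.empty
    -- total += freq.get(t, 0) over dict.fromkeys(digit tokens of tokens[:idx])
    (PySem.List.dedup ((tokens.take idx).filter (fun t => PySem.Str.strIsdigit t))).foldl
      (fun total t => total + freq.getD t 0) 0

-- ===== PRECONDITION & SPEC =====
def Spec_no_matches (scratchcard : String) (out : Int) : Prop := out = no_matches_alt scratchcard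
instance (scratchcard : String) (out : Int) : Decidable (Spec_no_matches scratchcard out) := by unfold Spec_no_matches; infer_instance

-- ===== CLAIM (what is proved, stated in full; the proofs are below) =====
def Claim_equal_no_matches : Prop := ∀ (scratchcard : String), Dom_no_matches scratchcard → Spec_no_matches scratchcard (no_matches scratchcard)

-- ===== LEMMAS AND PROOFS =====

-- while no "|" has been seen, A's loop only accumulates digit tokens into the set
lemma pvLeft (ts : List String) (h : "|" ∉ ts) (w : PySem.Set String) (m : Int) :
    ts.foldl pvStepA (w, m, false) =
      (PySem.Set.update w (ts.filter (fun t => PySem.Str.strIsdigit t)), m, false) := by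
  induction ts generalizing w with
  | nil => simp [PySem.Set.update]
  | cons t ts ih =>
    have ht : t ≠ "|" := fun e => h (e ▸ List.mem_cons_self)
    have hts : "|" ∉ ts := fun e => h (List.mem_cons_of_mem _ e)
    simp only [List.foldl_cons, pvStepA, if_neg ht, Bool.false_eq_true, if_false]
    by_cases hd : PySem.Str.strIsdigit t = true
    · rw [if_pos hd, ih hts, List.filter_cons, if_pos hd, PySem.Set.update_cons]
    · rw [if_neg hd, ih hts, List.filter_cons, if_neg hd]

-- after the "|" has been seen, A's loop counts tokens that are in the (now fixed) set
lemma pvRight (ts : List String) (w : PySem.Set String) (m : Int) :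
    (ts.foldl pvStepA (w, m, true)).2.1 =
      m + ((ts.filter (fun t => PySem.Set.contains w t)).length : Int) := by
  induction ts generalizing m with
  | nil => simp
  | cons t ts ih =>
    simp only [List.foldl_cons, pvStepA, ite_self]
    by_cases hc : t ∈ w
    · simp [hc, ih]; omega
    · simp [hc, ih]

-- a token stored in the winning set by A's left phase is a digit token, so "|" is never in it
lemma pvBarNotMem (pre : List String) :
    "|" ∉ PySem.Set.ofList (pre.filter (fun t => PySem.Str.strIsdigit t)) := by
  intro hmem
  rw [PySem.Set.mem_ofList] at hmem
  have := List.of_mem_filter hmem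
  simp [PySem.Str.strIsdigit, PySem.Chars.strIsdigit, PySem.Chars.isdigit] at this

-- counting tokens whose value lies in a nodup list = summing per-value counts over that list
lemma pvFilterSplit (suf : List String) (x : String) (L : List String) (hx : x ∉ L) :
    (suf.filter (fun t => decide (t ∈ x :: L))).length =
      suf.count x + (suf.filter (fun t => decide (t ∈ L))).length := by
  induction suf with
  | nil => simp
  | cons a suf ih =>
    simp only [List.mem_cons, Bool.decide_or] at ih ⊢
    rw [List.filter_cons, List.filter_cons, List.count_cons]
    by_cases hax : a = x
    · subst hax
      simp [hx, ih]
      omega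
    · by_cases haL : a ∈ L <;> simp [hax, haL, ih] <;> omega

lemma pvSumCount (L : List String) (suf : List String) (hnd : L.Nodup) :
    (L.map (fun t => (suf.count t : Int))).sum =
      ((suf.filter (fun t => decide (t ∈ L))).length : Int) := by
  induction L with
  | nil => simp
  | cons x L ih =>
    rw [List.nodup_cons] at hnd
    rw [List.map_cons, List.sum_cons, ih hnd.2, pvFilterSplit suf x L hnd.1]
    push_cast
    ring

-- ===== VERDICT (by name: the statement is the Claim_ definition above) =====
theorem no_matches_spec : Claim_equal_no_matches := by
  intro s _
  unfold Spec_no_matches no_matches no_matches_alt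
  cases hidx : PySem.List.index? (PySem.Str.split₀ s) "|" with
  | none =>
    have hnb : "|" ∉ PySem.Str.split₀ s := (PySem.List.index?_eq_none_iff _ _).mp hidx
    simp only [hidx]
    rw [pvLeft _ hnb]
  | some idx =>
    obtain ⟨pre, suf, heq, hlen, hnp⟩ := (PySem.List.index?_eq_some_iff _ _ _).mp hidx
    simp only [hidx]
    rw [heq]
    have htake : (pre ++ "|" :: suf).take idx = pre := by
      subst hlen; exact List.take_left' rfl
    have hdrop : (pre ++ "|" :: suf).drop (idx + 1) = suf := by
      subst hlen
      rw [show pre.length + 1 = (pre ++ ["|"]).length by simp,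
          show pre ++ "|" :: suf = (pre ++ ["|"]) ++ suf by simp]
      exact List.drop_left' rfl
    rw [List.foldl_append, pvLeft pre hnp]
    set L : List String := pre.filter (fun t => PySem.Str.strIsdigit t) with hL
    set W : PySem.Set String := PySem.Set.update PySem.Set.empty L with hWdef
    have hWof : W = PySem.Set.ofList L := rfl
    have hbar : "|" ∉ W := by rw [hWof]; exact pvBarNotMem pre
    rw [List.foldl_cons]
    have hstep : pvStepA (W, 0, false) "|" = (W, 0, true) := by
      simp [pvStepA, hbar]
    rw [hstep, pvRight, htake, hdrop]
    -- B side: the frequency dictionary reads back as suf.count, and the sum loop is a mapped sum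
    have hfreq : ∀ t, (suf.foldl (fun d t => d.insert t (d.getD t 0 + 1))
        PySem.Dict.empty).getD t 0 = (suf.count t : Int) := by
      intro t
      rw [PySem.Dict.getD_foldl_insert_add_one]
      simp
    have hsum := PySem.List.foldl_add (l := PySem.List.dedup L)
      (g := fun t => (suf.foldl (fun d t => d.insert t (d.getD t 0 + 1))
        PySem.Dict.empty).getD t 0) (a := 0)
    rw [hsum]
    have hmapa : (PySem.List.dedup L).map (fun t => (suf.foldl
          (fun d t => d.insert t (d.getD t 0 + 1)) PySem.Dict.empty).getD t 0) =
        (PySem.List.dedup L).map (fun t => (suf.count t : Int)) :=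
      List.map_congr_left (fun t _ => hfreq t)
    rw [hmapa, pvSumCount _ suf (PySem.List.nodup_dedup L)]
    have hfil : suf.filter (fun t => PySem.Set.contains W t) =
        suf.filter (fun t => decide (t ∈ PySem.List.dedup L)) := by
      apply List.filter_congr
      intro t _
      simp [hWof, PySem.Set.mem_ofList, PySem.Set.contains]
    rw [hfil]
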